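-- pv_equiv track=rewrite | github.com/chaubold/ilastik-backend | services/datatransferperformancetester.py | bin_generator
-- ===== SOURCE A (Python) =====
-- def bin_generator(data, bin_ends):
--     """ Yields a list for each bin """
--     max_idx_end = len(bin_ends) - 1
--     iends = enumerate(bin_ends)
--
--     idx_end, value_end = next(iends)
--     bin_data = []
--     for el in sorted(data):
--         while el >= value_end and idx_end != max_idx_end:
--             yield bin_data
--             bin_data = []
--             idx_end, value_end = next(iends)
--         bin_data.append(el)
--
--     # Finish
--     for unused in iends:
--         yield bin_data
--         bin_data = []
--     yield bin_data
-- ===== SOURCE B (Python) =====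
-- def _bisect_left(s, x):
--     lo, hi = 0, len(s)
--     while lo < hi:
--         mid = (lo + hi) // 2
--         if s[mid] < x:
--             lo = mid + 1
--         else:
--             hi = mid
--     return lo
--
-- def bin_generator(data, bin_ends):
--     """ Yields a list for each bin """
--     s = sorted(data)
--     prev = 0
--     for e in bin_ends[:-1]:
--         p = max(prev, _bisect_left(s, e))
--         yield s[prev:p]
--         prev = p
--     yield s[prev:]
-- ===== Notes on version B (the rewrite author's own statement) =====
-- stated objective: alternative
-- what changed: A merges element-by-element over the sorted data while advancing a boundary iterator; B computes each bin boundary's split index by binary search (bisect_left, clamped to be monotone) and emits consecutive slices of the sorted list, so bins are produced by index arithmetic instead of per-element accumulation.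
import Mathlib
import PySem

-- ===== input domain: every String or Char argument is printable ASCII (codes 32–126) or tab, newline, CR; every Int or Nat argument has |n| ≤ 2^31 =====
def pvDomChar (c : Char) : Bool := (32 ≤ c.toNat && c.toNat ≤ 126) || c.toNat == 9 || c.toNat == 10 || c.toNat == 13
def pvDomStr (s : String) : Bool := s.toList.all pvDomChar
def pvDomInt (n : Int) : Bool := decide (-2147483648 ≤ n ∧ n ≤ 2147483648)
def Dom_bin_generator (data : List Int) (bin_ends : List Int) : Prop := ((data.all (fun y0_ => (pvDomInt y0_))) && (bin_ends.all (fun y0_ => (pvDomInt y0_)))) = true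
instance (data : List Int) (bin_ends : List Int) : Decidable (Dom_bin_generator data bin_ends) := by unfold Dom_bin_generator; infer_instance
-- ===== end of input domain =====

-- B replaces A's element-by-element merge (advancing the boundary iterator inside the data loop)
-- by binary-searching each boundary's split index and slicing the sorted list; objective: alternative.
-- Both ports collect the generator's yields into a list (the Python functions are generators).

-- ===== PORT A =====
-- the inner `while el >= value_end and idx_end != max_idx_end` loop; `next(iends)` pops the head
-- of the remaining enumerate list (the [] branch is Python's StopIteration, unreachable while
-- idx_end ≠ max_idx_end).  State: (idx_end, value_end, iends, bin_data, yielded-so-far).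
def binA_while (el : Int) (maxI : Int) (idx : Int) (ve : Int) (iends : List (Int × Int))
    (bin : List Int) (out : List (List Int)) : Int × Int × List (Int × Int) × List Int × List (List Int) :=
  if ve ≤ el ∧ idx ≠ maxI then
    match iends with
    | (i2, v2) :: rs => binA_while el maxI i2 v2 rs [] (out ++ [bin])
    | [] => (idx, ve, [], bin, out)   -- StopIteration: never reached when idx ≠ maxI
  else (idx, ve, iends, bin, out)

-- the `for el in sorted(data)` loop, then the finish: `for unused in iends: yield bin_data; bin_data = []`
-- and the final `yield bin_data`.
def binA_loop (els : List Int) (maxI : Int) (idx : Int) (ve : Int) (iends : List (Int × Int))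
    (bin : List Int) (out : List (List Int)) : List (List Int) :=
  match els with
  | [] =>
    let fin := iends.foldl (fun (st : List Int × List (List Int)) _ => ([], st.2 ++ [st.1])) (bin, out)
    fin.2 ++ [fin.1]
  | el :: rest =>
    match binA_while el maxI idx ve iends bin out with
    | (idx', ve', iends', bin', out') => binA_loop rest maxI idx' ve' iends' (bin' ++ [el]) out'

def bin_generator (data : List Int) (bin_ends : List Int) : List (List Int) :=
  let max_idx_end : Int := (bin_ends.length : Int) - 1
  match PySem.List.enumerate bin_ends 0 with
  | [] => []   -- `next(iends)` raises (RuntimeError via PEP 479): excluded by Pre_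
  | (idx_end, value_end) :: iends =>
    binA_loop (PySem.List.sorted data (fun x => x) false) max_idx_end idx_end value_end iends [] []

-- ===== PORT B =====
-- hand-written bisect_left of Source B; the while loop runs on the measure hi - lo, ported with a
-- fuel counter that always suffices (fuel := len(s) ≥ hi - lo).  s[mid] is always in range in
-- the Python, so the getD default is never used (exact).
def bisect_left_loop (s : List Int) (x : Int) : Nat → Nat → Nat → Nat
  | 0, lo, _ => lo
  | fuel + 1, lo, hi =>
    if lo < hi then
      let mid := (lo + hi) / 2        -- (lo+hi)//2 on nonnegative ints = Nat division (exact here)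
      if s.getD mid 0 < x then bisect_left_loop s x fuel (mid + 1) hi
      else bisect_left_loop s x fuel lo mid
    else lo

def bisect_left (s : List Int) (x : Int) : Nat := bisect_left_loop s x s.length 0 s.length

def bin_generator_alt (data : List Int) (bin_ends : List Int) : List (List Int) :=
  let s := PySem.List.sorted data (fun x => x) false
  let st := (PySem.List.slice bin_ends none (some (-1))).foldl      -- bin_ends[:-1]
    (fun (st : Nat × List (List Int)) e =>
      let p := max st.1 (bisect_left s e)
      (p, st.2 ++ [PySem.List.slice s (some (st.1 : Int)) (some (p : Int))]))   -- yield s[prev:p]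
    (0, [])
  st.2 ++ [PySem.List.slice s (some (st.1 : Int)) none]                          -- yield s[prev:]

-- ===== PRECONDITION & SPEC =====
-- On empty bin_ends the Python A raises RuntimeError (next() on the exhausted enumerate, PEP 479).
def Pre_bin_generator (data : List Int) (bin_ends : List Int) : Prop := bin_ends ≠ []
instance (data : List Int) (bin_ends : List Int) : Decidable (Pre_bin_generator data bin_ends) := by
  unfold Pre_bin_generator; infer_instance

def pvWitness_bin_generator : List Int × List Int := ([3, 1, 2, 2], [2, 3])

def Spec_bin_generator (data : List Int) (bin_ends : List Int) (out : List (List Int)) : Prop :=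
  out = bin_generator_alt data bin_ends
instance (data : List Int) (bin_ends : List Int) (out : List (List Int)) : Decidable (Spec_bin_generator data bin_ends out) := by
  unfold Spec_bin_generator; infer_instance

-- ===== CLAIM (what is proved, stated in full; the proofs are below) =====
def Claim_equal_bin_generator : Prop := ∀ (data : List Int) (bin_ends : List Int), Dom_bin_generator data bin_ends → Pre_bin_generator data bin_ends → Spec_bin_generator data bin_ends (bin_generator data bin_ends)

-- ===== LEMMAS AND PROOFS =====

-- Common specification: specAux ve rest bin els = the bins still to be produced, where `ve` is the
-- current boundary, `rest` the remaining boundaries, `bin` the open bin, `els` the remaining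
-- (sorted) elements; the LAST boundary is never used as a filter.
def specAux (ve : Int) (rest : List Int) (bin : List Int) (els : List Int) : List (List Int) :=
  match rest with
  | [] => [bin ++ els]
  | v :: rs =>
    (bin ++ els.takeWhile (fun y => decide (y < ve))) ::
      specAux v rs [] (els.dropWhile (fun y => decide (y < ve)))

-- bin-free form used on the B side; consumes the list of USED boundaries.
def specB (bs : List Int) (t : List Int) : List (List Int) :=
  match bs with
  | [] => [t]
  | e :: es => t.takeWhile (fun y => decide (y < e)) :: specB es (t.dropWhile (fun y => decide (y < e)))

lemma specAux_eq_specB (rest : List Int) : ∀ (ve : Int) (els : List Int),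
    specAux ve rest [] els = specB ((ve :: rest).dropLast) els := by
  induction rest with
  | nil => intro ve els; simp [specAux, specB]
  | cons v rs ih => intro ve els; simp [specAux, specB, ih]

-- ---------- A side ----------

lemma finish_spec (iends : List (Int × Int)) : ∀ (bin : List Int) (out : List (List Int)),
    (let fin := iends.foldl (fun (st : List Int × List (List Int)) _ => ([], st.2 ++ [st.1])) (bin, out)
     fin.2 ++ [fin.1]) = out ++ bin :: List.replicate iends.length [] := by
  induction iends with
  | nil => intro bin out; simp
  | cons p ps ih => intro bin out; simpa [List.replicate_succ] using ih [] (out ++ [bin])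

lemma specAux_nil_els (rest : List Int) : ∀ (ve : Int) (bin : List Int),
    specAux ve rest bin [] = bin :: List.replicate rest.length [] := by
  induction rest with
  | nil => intro ve bin; simp [specAux]
  | cons v rs ih => intro ve bin; simp [specAux, List.replicate_succ, ih]

lemma specAux_cons_lt {el ve : Int} (h : el < ve) (rest : List Int) (bin els : List Int) :
    specAux ve rest bin (el :: els) = specAux ve rest (bin ++ [el]) els := by
  cases rest with
  | nil => simp [specAux]
  | cons v rs => simp [specAux, h]

lemma binA_loop_step {el ve maxI idx : Int} (h1 : ve ≤ el) (h2 : idx ≠ maxI)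
    (els : List Int) (i2 v2 : Int) (rs : List (Int × Int)) (bin : List Int) (out : List (List Int)) :
    binA_loop (el :: els) maxI idx ve ((i2, v2) :: rs) bin out
      = binA_loop (el :: els) maxI i2 v2 rs [] (out ++ [bin]) := by
  conv_lhs => rw [binA_loop, binA_while.eq_def]
  rw [if_pos ⟨h1, h2⟩]
  conv_rhs => rw [binA_loop]

lemma loopA_spec (els : List Int) : ∀ (vs : List Int) (idx ve : Int) (bin : List Int) (out : List (List Int)),
    binA_loop els (idx + vs.length) idx ve (PySem.List.enumerate vs (idx + 1)) bin out
      = out ++ specAux ve vs bin els := by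
  induction els with
  | nil =>
    intro vs idx ve bin out
    rw [binA_loop]
    simpa [PySem.List.length_enumerate] using
      (finish_spec (PySem.List.enumerate vs (idx + 1)) bin out).trans
        (by simp [PySem.List.length_enumerate, specAux_nil_els])
  | cons el els ih =>
    intro vs
    induction vs with
    | nil =>
      intro idx ve bin out
      rw [binA_loop, PySem.List.enumerate_nil, binA_while.eq_def, if_neg (by simp)]
      simpa [specAux] using ih [] idx ve (bin ++ [el]) out
    | cons v rs ihv =>
      intro idx ve bin out
      by_cases hel : el < ve
      · -- while condition is false: the element joins the current bin
        rw [binA_loop, binA_while.eq_def, if_neg (by push Not; intro h; omega)]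
        simpa [specAux_cons_lt hel] using ih (v :: rs) idx ve (bin ++ [el]) out
      · -- el ≥ ve and idx ≠ maxI: yield bin, advance to the next boundary
        have hne : idx ≠ idx + ((v :: rs).length : Int) := by simp; omega
        rw [PySem.List.enumerate_cons, binA_loop_step (by omega) hne]
        have hmax : idx + ((v :: rs).length : Int) = (idx + 1) + (rs.length : Int) := by
          simp; omega
        rw [hmax, show (idx + 1 + 1 : Int) = (idx + 1) + 1 from rfl, ihv]
        simp [specAux, hel]

-- ---------- B side ----------

-- number of elements of s below x, as the length of the leading run
def tl (s : List Int) (x : Int) : Nat := (s.takeWhile (fun y => decide (y < x))).length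

lemma tl_le (s : List Int) (x : Int) : tl s x ≤ s.length :=
  (List.takeWhile_prefix _).length_le

lemma takeWhile_eq_take_tl (s : List Int) (x : Int) :
    s.takeWhile (fun y => decide (y < x)) = s.take (tl s x) :=
  List.prefix_iff_eq_take.mp (List.takeWhile_prefix _)

lemma dropWhile_eq_drop_tl (s : List Int) (x : Int) :
    s.dropWhile (fun y => decide (y < x)) = s.drop (tl s x) := by
  have h := List.takeWhile_append_dropWhile (p := fun y => decide (y < x)) (l := s)
  have h2 : List.drop (s.takeWhile (fun y => decide (y < x))).length
      (s.takeWhile (fun y => decide (y < x)) ++ s.dropWhile (fun y => decide (y < x)))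
      = s.dropWhile (fun y => decide (y < x)) := List.drop_left
  rw [h] at h2
  exact h2.symm

-- on a sorted list, the elements below x are exactly the first (tl s x) positions
lemma tl_char (s : List Int) (hs : s.Pairwise (· ≤ ·)) (x : Int) (i : Nat) (hi : i < s.length) :
    s[i] < x ↔ i < tl s x := by
  constructor
  · intro h
    by_contra hnot
    have htl_le : tl s x ≤ i := by omega
    have htl : tl s x < s.length := lt_of_le_of_lt htl_le hi
    have hstl : ¬ s[tl s x] < x := by
      have h2 := List.head?_dropWhile_not (fun y => decide (y < x)) s
      rw [dropWhile_eq_drop_tl, List.head?_drop, List.getElem?_eq_getElem htl] at h2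
      simpa using h2
    have hmono : s[tl s x] ≤ s[i] := by
      rcases Nat.eq_or_lt_of_le htl_le with heq | hlt
      · simp [heq]
      · exact (List.pairwise_iff_getElem.mp hs) _ _ _ _ hlt
    omega
  · intro h
    have hpre := List.takeWhile_prefix (l := s) (fun y => decide (y < x))
    have hget := hpre.getElem (i := i) h
    have hmem := List.mem_takeWhile_imp (List.getElem_mem h)
    rw [hget] at hmem
    simpa using hmem

lemma tl_drop (s : List Int) (hs : s.Pairwise (· ≤ ·)) (x : Int) (prev : Nat)
    (hp : prev ≤ s.length) : tl (s.drop prev) x = tl s x - prev := by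
  have hsd : (s.drop prev).Pairwise (· ≤ ·) := hs.sublist (List.drop_sublist prev s)
  have h1 : tl (s.drop prev) x ≤ s.length - prev := by
    simpa using tl_le (s.drop prev) x
  have h2 : tl s x ≤ s.length := tl_le s x
  rcases Nat.lt_trichotomy (tl (s.drop prev) x) (tl s x - prev) with hlt | heq | hgt
  · exfalso
    have hi : tl (s.drop prev) x < (s.drop prev).length := by simp; omega
    have := (tl_char _ hsd x _ hi).mpr
    have hvc : ¬ (s.drop prev)[tl (s.drop prev) x] < x := by
      intro hv; have := (tl_char _ hsd x _ hi).mp hv; omega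
    have hvs : s[prev + tl (s.drop prev) x]'(by simp at hi; omega) < x := by
      have := (tl_char s hs x (prev + tl (s.drop prev) x) (by simp at hi; omega)).mpr (by omega)
      exact this
    rw [List.getElem_drop] at hvc
    exact hvc hvs
  · exact heq
  · exfalso
    have hi : tl s x - prev < (s.drop prev).length := by simp; omega
    have hv : (s.drop prev)[tl s x - prev] < x := (tl_char _ hsd x _ hi).mpr hgt
    rw [List.getElem_drop] at hv
    have := (tl_char s hs x (prev + (tl s x - prev)) (by simp at hi; omega)).mp hv
    omega

lemma bl_fuel (s : List Int) (x : Int) (hs : s.Pairwise (· ≤ ·)) :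
    ∀ (fuel lo hi : Nat), hi - lo ≤ fuel → lo ≤ tl s x → tl s x ≤ hi → hi ≤ s.length →
      bisect_left_loop s x fuel lo hi = tl s x := by
  intro fuel
  induction fuel with
  | zero => intro lo hi h1 h2 h3 h4; rw [bisect_left_loop]; omega
  | succ fuel ih =>
    intro lo hi h1 h2 h3 h4
    by_cases hlh : lo < hi
    · rw [bisect_left_loop.eq_def]
      simp only [if_pos hlh]
      have hmid : lo ≤ (lo + hi) / 2 ∧ (lo + hi) / 2 < hi := by omega
      have hlen : (lo + hi) / 2 < s.length := by omega
      rw [List.getD_eq_getElem s 0 hlen]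
      by_cases hv : s[(lo + hi) / 2] < x
      · rw [if_pos hv]
        have := (tl_char s hs x _ hlen).mp hv
        exact ih ((lo + hi) / 2 + 1) hi (by omega) (by omega) h3 h4
      · rw [if_neg hv]
        have : ¬ ((lo + hi) / 2 < tl s x) := fun hc => hv ((tl_char s hs x _ hlen).mpr hc)
        exact ih lo ((lo + hi) / 2) (by omega) h2 (by omega) (by omega)
    · rw [bisect_left_loop.eq_def]; simp only [if_neg hlh]; omega

lemma bisect_left_eq (s : List Int) (x : Int) (hs : s.Pairwise (· ≤ ·)) :
    bisect_left s x = tl s x := by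
  rw [bisect_left]
  exact bl_fuel s x hs s.length 0 s.length (by omega) (by omega) (tl_le s x) (le_refl _)

lemma foldB_spec (s : List Int) (hs : s.Pairwise (· ≤ ·)) (bs : List Int) :
    ∀ (prev : Nat) (out : List (List Int)), prev ≤ s.length →
    (let st := bs.foldl
        (fun (st : Nat × List (List Int)) e =>
          let p := max st.1 (bisect_left s e)
          (p, st.2 ++ [PySem.List.slice s (some (st.1 : Int)) (some (p : Int))]))
        (prev, out)
     st.2 ++ [PySem.List.slice s (some (st.1 : Int)) none]) = out ++ specB bs (s.drop prev) := by
  induction bs with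
  | nil =>
    intro prev out hp
    simp [specB, PySem.List.slice_from_natCast]
  | cons e es ih =>
    intro prev out hp
    have hble : bisect_left s e = tl s e := bisect_left_eq s e hs
    have hple : max prev (bisect_left s e) ≤ s.length := by
      have := tl_le s e; omega
    simp only [List.foldl_cons]
    have happ := ih (max prev (bisect_left s e)) (out ++ [PySem.List.slice s (some (prev : Int)) (some (((max prev (bisect_left s e)) : Nat) : Int))]) hple
    simp only at happ
    rw [happ]
    have htake : PySem.List.slice s (some (prev : Int)) (some (((max prev (bisect_left s e)) : Nat) : Int))
        = (s.drop prev).takeWhile (fun y => decide (y < e)) := by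
      rw [PySem.List.slice_natCast, takeWhile_eq_take_tl, tl_drop s hs e prev hp, hble]
      congr 1
      omega
    have hdrop : s.drop (max prev (bisect_left s e))
        = (s.drop prev).dropWhile (fun y => decide (y < e)) := by
      rw [dropWhile_eq_drop_tl, tl_drop s hs e prev hp, List.drop_drop, hble]
      congr 1
      have := tl_le s e
      omega
    rw [htake, hdrop, specB]
    simp

-- ---------- assembly ----------

lemma sorted_pairwise_le (data : List Int) :
    (PySem.List.sorted data (fun x => x) false).Pairwise (· ≤ ·) := by
  simpa using PySem.List.sorted_pairwise data (fun x => x)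

-- ===== VERDICT (by name: the statement is the Claim_ definition above) =====
theorem bin_generator_spec : Claim_equal_bin_generator := by
  intro data bin_ends _ hpre
  unfold Spec_bin_generator
  cases bin_ends with
  | nil => exact absurd rfl hpre
  | cons e tail =>
    have hs := sorted_pairwise_le data
    -- A side
    rw [bin_generator]
    rw [PySem.List.enumerate_cons]
    simp only []
    have hmax : ((e :: tail).length : Int) - 1 = 0 + (tail.length : Int) := by simp
    rw [hmax, show (0 : Int) + 1 = 0 + 1 from rfl, loopA_spec]
    -- B side
    rw [bin_generator_alt]
    simp only [PySem.List.slice_to_neg_one]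
    have hB := foldB_spec (PySem.List.sorted data (fun x => x) false) hs
      ((e :: tail).dropLast) 0 [] (by omega)
    simp only at hB
    rw [hB]
    simp only [List.drop_zero, List.nil_append, specAux_eq_specB]
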